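-- pv_equiv track=rewrite | github.com/neckless-was-taken/advent-of-code | year_2023/day 3/day 3 part 1.py | oneBefore
-- ===== SOURCE A (Python) =====
-- def oneBefore(start,n,schematic):
--     for i,char in enumerate(schematic[n]):
--         if i == start-1:
--             if char.isdigit() or char == '.':
--                 break
--             else:
--                 return True
--     return False
-- ===== SOURCE B (Python) =====
-- def oneBefore(start, n, schematic):
--     row = schematic[n]
--     idx = start - 1
--     if 0 <= idx < len(row):
--         c = row[idx]
--         return not (c.isdigit() or c == '.')
--     return False
-- ===== Notes on version B (the rewrite author's own statement) =====
-- stated objective: simpler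
-- what changed: B replaces A's scan over enumerate(row) with a bounds-guarded direct index row[start-1], removing the loop entirely.
import Mathlib
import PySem

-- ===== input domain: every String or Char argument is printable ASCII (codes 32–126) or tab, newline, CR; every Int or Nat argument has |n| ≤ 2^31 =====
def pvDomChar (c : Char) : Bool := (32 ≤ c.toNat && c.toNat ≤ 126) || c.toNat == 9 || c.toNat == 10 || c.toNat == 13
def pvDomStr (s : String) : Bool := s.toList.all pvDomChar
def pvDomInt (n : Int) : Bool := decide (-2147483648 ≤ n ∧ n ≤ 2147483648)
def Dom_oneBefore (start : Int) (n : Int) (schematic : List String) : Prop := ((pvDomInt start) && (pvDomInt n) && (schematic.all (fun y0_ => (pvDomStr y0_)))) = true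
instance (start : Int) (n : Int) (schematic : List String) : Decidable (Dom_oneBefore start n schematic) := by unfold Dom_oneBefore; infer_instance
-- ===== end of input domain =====

-- B replaces A's scan over enumerate(row) with a bounds-guarded direct index row[start-1] (simpler, no loop).

-- ===== PORT A =====
-- the 'for i,char in enumerate(...)' loop with its break/return/fall-through
def oneBeforeLoopA (start : Int) : List (Int × Char) → Bool
  | [] => false
  | (i, c) :: rest =>
    if i = start - 1 then
      if PySem.Chars.isdigit c || c = '.' then false  -- break → return False
      else true
    else oneBeforeLoopA start rest

def oneBefore (start : Int) (n : Int) (schematic : List String) : Bool :=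
  match PySem.List.pyGet? schematic n with
  | none => false   -- IndexError in Python; excluded by Pre_
  | some row => oneBeforeLoopA start (PySem.List.enumerate row.toList 0)

-- ===== PORT B =====
def oneBefore_alt (start : Int) (n : Int) (schematic : List String) : Bool :=
  match PySem.List.pyGet? schematic n with
  | none => false   -- IndexError in Python; excluded by Pre_
  | some row =>
    let idx := start - 1
    if 0 ≤ idx ∧ idx < (row.toList.length : Int) then
      match PySem.List.pyGet? row.toList idx with
      | none => false   -- unreachable under the guard
      | some c => !(PySem.Chars.isdigit c || c = '.')
    else false

-- ===== PRECONDITION & SPEC =====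
-- Pre_ excludes exactly the inputs where schematic[n] raises IndexError in Python.
def Pre_oneBefore (start : Int) (n : Int) (schematic : List String) : Prop :=
  PySem.Raise.InRange schematic.length n
instance (start : Int) (n : Int) (schematic : List String) : Decidable (Pre_oneBefore start n schematic) := by unfold Pre_oneBefore; infer_instance

def pvWitness_oneBefore : Int × Int × List String := (2, 0, ["#1.."])

def Spec_oneBefore (start : Int) (n : Int) (schematic : List String) (out : Bool) : Prop := out = oneBefore_alt start n schematic
instance (start : Int) (n : Int) (schematic : List String) (out : Bool) : Decidable (Spec_oneBefore start n schematic out) := by unfold Spec_oneBefore; infer_instance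

-- ===== CLAIM (what is proved, stated in full; the proofs are below) =====
def Claim_equal_oneBefore : Prop := ∀ (start : Int) (n : Int) (schematic : List String), Dom_oneBefore start n schematic → Pre_oneBefore start n schematic → Spec_oneBefore start n schematic (oneBefore start n schematic)

-- ===== LEMMAS AND PROOFS =====

lemma loopA_eq (start : Int) (cs : List Char) (s : Int) :
    oneBeforeLoopA start (PySem.List.enumerate cs s) =
      (if 0 ≤ start - 1 - s ∧ start - 1 - s < (cs.length : Int) then
        match PySem.List.pyGet? cs (start - 1 - s) with
        | none => false
        | some c => !(PySem.Chars.isdigit c || c = '.')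
      else false) := by
  induction cs generalizing s with
  | nil => simp [PySem.List.enumerate, oneBeforeLoopA]
  | cons c cs ih =>
    rw [PySem.List.enumerate_cons, oneBeforeLoopA]
    by_cases h : s = start - 1
    · have h0 : start - 1 - s = 0 := by omega
      simp [h]
    · rw [if_neg (by omega), ih (s + 1)]
      by_cases hin : 0 ≤ start - 1 - s ∧ start - 1 - s < ((c :: cs).length : Int)
      · have h1 : 0 ≤ start - 1 - (s + 1) ∧ start - 1 - (s + 1) < (cs.length : Int) := by
          simp at hin; omega
        rw [if_pos hin, if_pos h1]
        have : start - 1 - s = (start - 1 - (s + 1)) + 1 := by omega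
        rw [this]
        rw [show ((start - 1 - (s + 1)) + 1 : Int) = ((start - 1 - (s + 1)).toNat : Int) + 1 by omega,
          PySem.List.pyGet?_cons_succ, Int.toNat_of_nonneg h1.1]
      · rw [if_neg hin, if_neg (by simp at hin ⊢; omega)]

theorem oneBefore_spec : Claim_equal_oneBefore := by
  intro start n schematic _ _
  unfold Spec_oneBefore oneBefore oneBefore_alt
  cases PySem.List.pyGet? schematic n with
  | none => rfl
  | some row =>
    simp only [loopA_eq start row.toList 0]
    norm_num
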